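-- pv_equiv track=rewrite | github.com/miliar/Code_Jam_Webscraper | solutions_python/Problem_170/35.py | _solve
-- ===== SOURCE A (Python) =====
-- inf = 10**20
--
-- def _solve(sentences):
--     ss = []
--     for sentence in sentences:
--         ss.append(set(sentence.split(" ")))
--
--     english_base = ss[0]
--     french_base = ss[1]
--     ss = ss[2:]
--     res = [inf]
--
--
--     def dfs(sss, english_w, french_w):
--         if len(english_w & french_w) > res[0]:
--             return
--         if len(sss) == 0:
--             res[0] = min(res[0], len(english_w & french_w))
--         else:
--             dfs(sss[1:], english_w | sss[0], french_w)
--             dfs(sss[1:], english_w, french_w | sss[0])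
--
--     dfs(ss, english_base, french_base)
--
--     return res[0]
-- ===== SOURCE B (Python) =====
-- def _solve(sentences):
--     sets = [set(s.split(" ")) for s in sentences]
--     states = [(sets[0], sets[1])]
--     for r in sets[2:]:
--         states = [q for (e, f) in states for q in ((e | r, f), (e, f | r))]
--     return min(len(e & f) for (e, f) in states)
-- ===== Notes on version B (the rewrite author's own statement) =====
-- stated objective: alternative
-- what changed: Replaced the pruned recursive two-way DFS (mutable best-so-far cell, branch cut when the running intersection already exceeds it) with a flat iterative breadth-first enumeration: a list of (english, french) candidate pairs is doubled once per remaining sentence and the minimum intersection size is taken over the final list of all 2^n partitions.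
import Mathlib
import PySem

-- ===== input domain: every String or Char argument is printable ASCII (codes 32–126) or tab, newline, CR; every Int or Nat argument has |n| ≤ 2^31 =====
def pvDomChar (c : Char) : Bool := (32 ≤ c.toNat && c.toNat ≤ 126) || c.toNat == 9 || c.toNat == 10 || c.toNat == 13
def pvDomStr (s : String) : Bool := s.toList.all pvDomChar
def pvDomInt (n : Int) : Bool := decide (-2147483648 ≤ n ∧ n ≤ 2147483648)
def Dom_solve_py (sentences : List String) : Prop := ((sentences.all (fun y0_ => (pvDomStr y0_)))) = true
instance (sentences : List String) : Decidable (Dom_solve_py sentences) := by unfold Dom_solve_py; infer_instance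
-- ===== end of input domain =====

-- B replaces A's pruned recursive DFS by a flat iterative doubling of a candidate-pair list (alternative decomposition, same exact result).

-- ===== PORT A =====
-- inf = 10**20
def pvInf : Int := 10 ^ 20

-- the inner recursive dfs; Python's mutable cell res[0] is threaded as the argument `res` and the return value
def pvDfs (sss : List (PySem.Set String)) (english_w french_w : PySem.Set String) (res : Int) : Int :=
  if (PySem.Set.inter english_w french_w).len > res then res
  else
    match sss with
    | [] => min res (PySem.Set.inter english_w french_w).len
    | s :: t =>
      let res1 := pvDfs t (PySem.Set.union english_w s) french_w res
      pvDfs t english_w (PySem.Set.union french_w s) res1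

def solve_py (sentences : List String) : Int :=
  -- ss built by the append loop; sentence.split(" ") has a nonempty separator, so split? is always `some`
  let ss : List (PySem.Set String) :=
    sentences.foldl (fun acc sentence => acc ++ [PySem.Set.ofList ((PySem.Str.split? sentence " ").getD [])]) []
  match ss with
  | english_base :: french_base :: rest => pvDfs rest english_base french_base pvInf
  | _ => 0  -- ss[0] / ss[1]: IndexError, excluded by Pre_

-- ===== PORT B =====
def solve_py_alt (sentences : List String) : Int :=
  let sets : List (PySem.Set String) :=
    sentences.map (fun s => PySem.Set.ofList ((PySem.Str.split? s " ").getD []))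
  match sets with
  | e0 :: rest1 =>
    match rest1 with
    | f0 :: rest =>
      let states : List (PySem.Set String × PySem.Set String) :=
        rest.foldl
          (fun sts r => sts.flatMap (fun p => [(PySem.Set.union p.1 r, p.2), (p.1, PySem.Set.union p.2 r)]))
          [(e0, f0)]
      match PySem.List.min? (states.map (fun p => (PySem.Set.inter p.1 p.2).len)) (fun x => x) with
      | some m => m
      | none => 0  -- unreachable: states is never empty
    | [] => 0  -- sets[1]: IndexError, excluded by Pre_
  | [] => 0  -- sets[0]: IndexError, excluded by Pre_

-- ===== PRECONDITION & SPEC =====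
-- A raises IndexError (ss[0]/ss[1]) when fewer than two sentences are given; B raises there too.
-- The second conjunct only excludes mathematical inputs with at least 10^19 characters in one sentence — no
-- executable input reaches it; it is needed because A caps its answer by the sentinel inf = 10^20, which in
-- the mathematical model could differ from the true minimum only at such astronomical sizes.
def Pre_solve_py (sentences : List String) : Prop :=
  2 ≤ sentences.length ∧ ∀ s ∈ sentences, s.toList.length < 10 ^ 19
instance (sentences : List String) : Decidable (Pre_solve_py sentences) := by unfold Pre_solve_py; infer_instance
def pvWitness_solve_py : List String := ["a b", "b c"]

def Spec_solve_py (sentences : List String) (out : Int) : Prop := out = solve_py_alt sentences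
instance (sentences : List String) (out : Int) : Decidable (Spec_solve_py sentences out) := by unfold Spec_solve_py; infer_instance

-- ===== CLAIM (what is proved, stated in full; the proofs are below) =====
def Claim_equal_solve_py : Prop := ∀ (sentences : List String), Dom_solve_py sentences → Pre_solve_py sentences → Spec_solve_py sentences (solve_py sentences)

-- ===== LEMMAS AND PROOFS =====

-- the value both programs take the minimum of
def pvK (e f : PySem.Set String) : Int := (PySem.Set.inter e f).len

-- the true minimum over all two-way distributions of sss, as a structural recursion
def pvMinVal (sss : List (PySem.Set String)) (e f : PySem.Set String) : Int :=
  match sss with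
  | [] => pvK e f
  | s :: t => min (pvMinVal t (PySem.Set.union e s) f) (pvMinVal t e (PySem.Set.union f s))

-- full expansion of one candidate pair, mirroring B's per-element doubling
def pvExpand (sss : List (PySem.Set String)) (p : PySem.Set String × PySem.Set String) :
    List (PySem.Set String × PySem.Set String) :=
  match sss with
  | [] => [p]
  | s :: t => pvExpand t (PySem.Set.union p.1 s, p.2) ++ pvExpand t (p.1, PySem.Set.union p.2 s)

theorem pvLen_le_of_nodup_subset {α : Type} (l1 l2 : List α) [DecidableEq α]
    (h : l1.Nodup) (hs : l1 ⊆ l2) : l1.length ≤ l2.length := by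
  calc l1.length = l1.toFinset.card := (List.toFinset_card_of_nodup h).symm
    _ ≤ l2.toFinset.card := Finset.card_le_card (by intro x hx; exact List.mem_toFinset.mpr (hs (List.mem_toFinset.mp hx)))
    _ ≤ l2.length := l2.toFinset_card_le

-- the intersection can only grow when a set is unioned into either side
theorem pvK_le_union_left (e f s : PySem.Set String) (he : List.Nodup e) :
    pvK e f ≤ pvK (PySem.Set.union e s) f := by
  simp only [pvK, PySem.Set.len_eq]
  have h1 : List.Nodup (PySem.Set.inter e f) := PySem.Set.nodup_inter e f he
  have h2 : (PySem.Set.inter e f) ⊆ (PySem.Set.inter (PySem.Set.union e s) f) := by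
    intro x hx
    rcases (PySem.Set.mem_inter e f x).mp hx with ⟨hxe, hxf⟩
    exact (PySem.Set.mem_inter _ f x).mpr ⟨(PySem.Set.mem_union e s x).mpr (Or.inl hxe), hxf⟩
  exact_mod_cast pvLen_le_of_nodup_subset _ _ h1 h2

theorem pvK_le_union_right (e f s : PySem.Set String) (he : List.Nodup e) :
    pvK e f ≤ pvK e (PySem.Set.union f s) := by
  simp only [pvK, PySem.Set.len_eq]
  have h1 : List.Nodup (PySem.Set.inter e f) := PySem.Set.nodup_inter e f he
  have h2 : (PySem.Set.inter e f) ⊆ (PySem.Set.inter e (PySem.Set.union f s)) := by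
    intro x hx
    rcases (PySem.Set.mem_inter e f x).mp hx with ⟨hxe, hxf⟩
    exact (PySem.Set.mem_inter e _ x).mpr ⟨hxe, (PySem.Set.mem_union f s x).mpr (Or.inl hxf)⟩
  exact_mod_cast pvLen_le_of_nodup_subset _ _ h1 h2

-- every value reachable below (e, f) is at least the current intersection size (soundness of A's prune)
theorem pvK_le_minVal (sss : List (PySem.Set String)) (e f : PySem.Set String) (he : List.Nodup e) :
    pvK e f ≤ pvMinVal sss e f := by
  induction sss generalizing e f with
  | nil => exact le_refl _
  | cons s t ih =>
    simp only [pvMinVal, le_min_iff]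
    exact ⟨le_trans (pvK_le_union_left e f s he) (ih _ f (PySem.Set.nodup_union e s he)),
           le_trans (pvK_le_union_right e f s he) (ih e _ he)⟩

-- A's pruned DFS computes min res (true minimum)
theorem pvDfs_eq (sss : List (PySem.Set String)) (e f : PySem.Set String) (res : Int)
    (he : List.Nodup e) : pvDfs sss e f res = min res (pvMinVal sss e f) := by
  induction sss generalizing e f res with
  | nil =>
    simp only [pvDfs, pvMinVal]
    split_ifs with h
    · have := pvK_le_minVal [] e f he
      simp only [pvMinVal, pvK] at this ⊢
      omega
    · rfl
  | cons s t ih =>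
    simp only [pvDfs, pvMinVal]
    split_ifs with h
    · have := pvK_le_minVal (s :: t) e f he
      simp only [pvMinVal, le_min_iff, pvK] at this
      omega
    · rw [ih _ f res (PySem.Set.nodup_union e s he), ih e _ _ he]
      omega

-- the true minimum is bounded by the size of the (never-growing) left base set
theorem pvMinVal_le_len (sss : List (PySem.Set String)) (e f : PySem.Set String)
    (he : List.Nodup e) : pvMinVal sss e f ≤ (e.length : Int) := by
  induction sss generalizing f with
  | nil =>
    simp only [pvMinVal, pvK, PySem.Set.len_eq]
    have h1 : List.Nodup (PySem.Set.inter e f) := PySem.Set.nodup_inter e f he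
    have hsub : (PySem.Set.inter e f) ⊆ e := fun x hx => ((PySem.Set.mem_inter e f x).mp hx).1
    exact_mod_cast pvLen_le_of_nodup_subset _ _ h1 hsub
  | cons s t ih =>
    simp only [pvMinVal, min_le_iff]
    exact Or.inr (ih (PySem.Set.union f s))

theorem pvFoldlMinMin (l : List Int) (a b : Int) :
    l.foldl min (min a b) = min a (l.foldl min b) := by
  induction l generalizing b with
  | nil => rfl
  | cons c t ih =>
    simp only [List.foldl_cons, min_assoc]
    exact ih (min b c)

theorem pvMin?_append (l1 l2 : List Int) (a b : Int)
    (h1 : PySem.List.min? l1 (fun x => x) = some a)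
    (h2 : PySem.List.min? l2 (fun x => x) = some b) :
    PySem.List.min? (l1 ++ l2) (fun x => x) = some (min a b) := by
  match l1, l2 with
  | [], _ => simp [PySem.List.min?] at h1
  | _, [] => simp [PySem.List.min?] at h2
  | x :: t1, y :: t2 =>
    rw [PySem.List.min?_id_cons] at h1 h2
    rw [List.cons_append, PySem.List.min?_id_cons, List.foldl_append, List.foldl_cons]
    injection h1 with h1; injection h2 with h2
    subst h1 h2
    congr 1
    exact pvFoldlMinMin t2 _ y

-- the min of the intersection sizes over the full expansion is pvMinVal
theorem pvExpand_min (sss : List (PySem.Set String)) (p : PySem.Set String × PySem.Set String) :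
    PySem.List.min? ((pvExpand sss p).map (fun q => (PySem.Set.inter q.1 q.2).len)) (fun x => x)
      = some (pvMinVal sss p.1 p.2) := by
  induction sss generalizing p with
  | nil => simp [pvExpand, pvMinVal, pvK, PySem.List.min?_id_cons]
  | cons s t ih =>
    simp only [pvExpand, pvMinVal, List.map_append]
    exact pvMin?_append _ _ _ _ (ih (PySem.Set.union p.1 s, p.2)) (ih (p.1, PySem.Set.union p.2 s))

-- B's fold is the flatMap of full expansions
theorem pvFoldl_expand (sss : List (PySem.Set String))
    (sts : List (PySem.Set String × PySem.Set String)) :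
    sss.foldl
        (fun sts r => sts.flatMap (fun p => [(PySem.Set.union p.1 r, p.2), (p.1, PySem.Set.union p.2 r)]))
        sts
      = sts.flatMap (pvExpand sss) := by
  induction sss generalizing sts with
  | nil => simp [pvExpand]
  | cons s t ih =>
    rw [List.foldl_cons, ih, List.flatMap_assoc]
    congr 1
    funext p
    simp [pvExpand]

-- the two loops over `sentences` build the same list of word sets
theorem pvSets_eq (sentences : List String) :
    sentences.foldl (fun acc sentence => acc ++ [PySem.Set.ofList ((PySem.Str.split? sentence " ").getD [])]) []
      = sentences.map (fun s => PySem.Set.ofList ((PySem.Str.split? s " ").getD [])) := by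
  simpa using PySem.List.foldl_append_singleton_eq_map
    (l := sentences) (f := fun s => PySem.Set.ofList ((PySem.Str.split? s " ").getD [])) (acc := [])

-- splitOn's worker produces at most acc + fuel + 1 pieces
theorem pvGoLen (sep : List Char) (fuel : Nat) :
    ∀ (l cur : List Char) (acc : List (List Char)),
      (PySem.Chars.splitOn.go sep fuel l cur acc).length ≤ acc.length + fuel + 1 := by
  induction fuel with
  | zero => intro l cur acc; simp [PySem.Chars.splitOn.go]
  | succ n ih =>
    intro l cur acc
    cases l with
    | nil => simp [PySem.Chars.splitOn.go]
    | cons c rest =>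
      rw [PySem.Chars.splitOn.go]
      split_ifs with h
      · have := ih (List.drop sep.length (c :: rest)) [] (cur.reverse :: acc)
        simp at this ⊢; omega
      · have := ih rest (c :: cur) acc
        omega

-- the word set of a sentence has at most length s + 2 elements
theorem pvSetLen_le (s : String) :
    (PySem.Set.ofList ((PySem.Str.split? s " ").getD [])).length ≤ s.toList.length + 2 := by
  have h1 := PySem.Set.length_ofList_le ((PySem.Str.split? s " ").getD [])
  have h2 : ((PySem.Str.split? s " ").getD []).length ≤ s.toList.length + 2 := by
    simp only [PySem.Str.split?, PySem.Chars.split?]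
    simp only [List.isEmpty_iff]
    have : (" " : String).toList = [' '] := rfl
    rw [this]
    simp only [reduceCtorEq, if_false, Option.map_some, Option.getD_some, List.length_map]
    have := pvGoLen [' '] (s.toList.length + 1) s.toList [] []
    simpa [PySem.Chars.splitOn] using this
  omega

-- ===== VERDICT (by name: the statement is the Claim_ definition above) =====
theorem solve_py_spec : Claim_equal_solve_py := by
  intro sentences _ hpre
  obtain ⟨hlen, hbound⟩ := hpre
  unfold Spec_solve_py solve_py solve_py_alt
  match hs : sentences with
  | [] => simp at hlen
  | [_] => simp at hlen
  | s0 :: s1 :: rest =>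
    rw [pvSets_eq]
    simp only [List.map_cons]
    set g : String → PySem.Set String := fun s => PySem.Set.ofList ((PySem.Str.split? s " ").getD []) with hg
    have he : List.Nodup (g s0) := PySem.Set.nodup_ofList _
    -- B's side
    rw [pvFoldl_expand]
    have hB := pvExpand_min (rest.map g) (g s0, g s1)
    simp only [List.flatMap_cons, List.flatMap_nil, List.append_nil]
    rw [hB]
    -- A's side
    rw [pvDfs_eq _ _ _ _ he]
    -- the minimum is below inf, so A's sentinel never caps it
    have h1 : pvMinVal (rest.map g) (g s0) (g s1) ≤ ((g s0).length : Int) := pvMinVal_le_len _ _ _ he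
    have h2 : (g s0).length ≤ s0.toList.length + 2 := pvSetLen_le s0
    have h3 : s0.toList.length < 10 ^ 19 := hbound s0 (by simp)
    have h4 : pvMinVal (rest.map g) (g s0) (g s1) < pvInf := by
      simp only [pvInf]
      have : ((g s0).length : Int) < 10 ^ 20 := by exact_mod_cast lt_of_le_of_lt h2 (by omega)
      omega
    exact min_eq_right (le_of_lt h4)
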